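-- pv_equiv track=rewrite | github.com/ARTORG-GERONTECHNOLOGY/Bearny-RehaAdvisor | backend/utils/interventions.py | _lang_fallback_chain
-- ===== SOURCE A (Python) =====
-- from typing import Any, Dict, List, Optional, Tuple
--
-- def _lang_fallback_chain(user_lang: str) -> List[str]:
--     """
--     Priority order: user_lang -> en -> de (and avoid duplicates).
--     """
--     user_lang = (user_lang or "").strip().lower()
--     chain = [user_lang, "en", "de"]
--     out = []
--     seen = set()
--     for l in chain:
--         if l and l not in seen:
--             out.append(l)
--             seen.add(l)
--     return out or ["en", "de"]
-- ===== SOURCE B (Python) =====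
-- def _lang_fallback_chain(user_lang: str):
--     user_lang = (user_lang or "").strip().lower()
--     if user_lang == "de":
--         return ["de", "en"]
--     if user_lang in ("", "en"):
--         return ["en", "de"]
--     return [user_lang, "en", "de"]
-- ===== Notes on version B (the rewrite author's own statement) =====
-- stated objective: simpler
-- what changed: Replaces the build-list-then-dedup-with-seen-set loop (plus the unreachable trailing 'or' fallback) by direct case analysis on the normalized language, returning one of three literal chains.
import Mathlib
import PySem

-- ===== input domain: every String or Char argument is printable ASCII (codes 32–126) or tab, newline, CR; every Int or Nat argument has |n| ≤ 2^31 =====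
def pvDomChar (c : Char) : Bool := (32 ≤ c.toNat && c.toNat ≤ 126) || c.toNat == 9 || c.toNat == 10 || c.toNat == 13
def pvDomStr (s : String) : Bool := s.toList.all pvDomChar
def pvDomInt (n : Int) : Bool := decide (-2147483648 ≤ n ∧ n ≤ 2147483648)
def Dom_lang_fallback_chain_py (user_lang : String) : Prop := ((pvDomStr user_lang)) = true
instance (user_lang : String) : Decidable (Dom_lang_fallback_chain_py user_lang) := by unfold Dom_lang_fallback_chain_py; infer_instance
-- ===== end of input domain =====

-- B replaces A's dedup loop over [user_lang,"en","de"] by direct case analysis on the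
-- normalized language (objective: simpler).

-- ===== PORT A =====
def lang_fallback_chain_py (user_lang : String) : List String :=
  let u := PySem.Str.lower (PySem.Str.strip user_lang)
  let chain := [u, "en", "de"]
  let res := chain.foldl
    (fun (st : List String × PySem.Set String) l =>
      if l ≠ "" ∧ ¬ (PySem.Set.contains st.2 l = true) then (st.1 ++ [l], PySem.Set.add st.2 l)
      else st)
    ([], PySem.Set.empty)
  if res.1 = [] then ["en", "de"] else res.1

-- ===== PORT B =====
def lang_fallback_chain_py_alt (user_lang : String) : List String :=
  let u := PySem.Str.lower (PySem.Str.strip user_lang)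
  if u = "de" then ["de", "en"]
  else if u = "" ∨ u = "en" then ["en", "de"]
  else [u, "en", "de"]

-- ===== PRECONDITION & SPEC =====
def Spec_lang_fallback_chain_py (user_lang : String) (out : List String) : Prop := out = lang_fallback_chain_py_alt user_lang
instance (user_lang : String) (out : List String) : Decidable (Spec_lang_fallback_chain_py user_lang out) := by unfold Spec_lang_fallback_chain_py; infer_instance

-- ===== CLAIM (what is proved, stated in full; the proofs are below) =====
def Claim_equal_lang_fallback_chain_py : Prop := ∀ (user_lang : String), Dom_lang_fallback_chain_py user_lang → Spec_lang_fallback_chain_py user_lang (lang_fallback_chain_py user_lang)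

-- ===== LEMMAS AND PROOFS =====

-- Both ports compute from the normalized string u; compare the loop with the case split by cases on u.
theorem lang_fallback_chain_cases (u : String) :
    (if ([u, "en", "de"].foldl
        (fun (st : List String × PySem.Set String) l =>
          if l ≠ "" ∧ ¬ (PySem.Set.contains st.2 l = true) then (st.1 ++ [l], PySem.Set.add st.2 l)
          else st)
        ([], PySem.Set.empty)).1 = [] then ["en", "de"]
     else ([u, "en", "de"].foldl
        (fun (st : List String × PySem.Set String) l =>
          if l ≠ "" ∧ ¬ (PySem.Set.contains st.2 l = true) then (st.1 ++ [l], PySem.Set.add st.2 l)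
          else st)
        ([], PySem.Set.empty)).1) =
    (if u = "de" then ["de", "en"]
     else if u = "" ∨ u = "en" then ["en", "de"]
     else [u, "en", "de"]) := by
  by_cases hde : u = "de"
  · rw [hde]; decide
  · by_cases hen : u = "en"
    · rw [hen]; decide
    · by_cases hnil : u = ""
      · rw [hnil]; decide
      · have hde' : ¬("de" = u) := fun h => hde h.symm
        have hen' : ¬("en" = u) := fun h => hen h.symm
        simp [PySem.Set.empty, PySem.Set.add, PySem.Set.contains, List.foldl,
              hde, hen, hnil, hde', hen']

-- ===== VERDICT (by name: the statement is the Claim_ definition above) =====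
theorem lang_fallback_chain_py_spec : Claim_equal_lang_fallback_chain_py := by
  intro s _
  unfold Spec_lang_fallback_chain_py lang_fallback_chain_py lang_fallback_chain_py_alt
  exact lang_fallback_chain_cases (PySem.Str.lower (PySem.Str.strip s))
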